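-- pv_equiv track=rewrite | github.com/isavita/advent_generated | day9_part2_2023.py | calculate_extrapolations
-- ===== SOURCE A (Python) =====
-- def all_zeros(nums):
--     return all(num == 0 for num in nums)
--
-- def calculate_extrapolation(history):
--     extrapolations = []
--     for i in range(1, len(history)):
--         extrapolation = history[i] - history[i-1]
--         extrapolations.append(extrapolation)
--     return extrapolations
--
-- def calculate_extrapolations(history):
--     extrapolations_series = [history]
--     for i in range(1, len(history)):
--         previous_extrapolations = extrapolations_series[i-1]
--         if all_zeros(previous_extrapolations):
--             return extrapolations_series
--         extrapolations = calculate_extrapolation(previous_extrapolations)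
--         extrapolations_series.append(extrapolations)
--     return extrapolations_series
-- ===== SOURCE B (Python) =====
-- def calculate_extrapolations(history):
--     def diffs(seq):
--         return [b - a for a, b in zip(seq, seq[1:])]
--     def go(seq):
--         if len(seq) <= 1 or all(x == 0 for x in seq):
--             return [seq]
--         return [seq] + go(diffs(seq))
--     return go(history)
-- ===== Notes on version B (the rewrite author's own statement) =====
-- stated objective: simpler
-- what changed: Replaces A's indexed loop over a growing series list (with index-based access to the previous row and an index-computed difference pass) by a direct structural recursion that prepends the current row to the recursion on its zip-computed consecutive differences.
import Mathlib
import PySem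

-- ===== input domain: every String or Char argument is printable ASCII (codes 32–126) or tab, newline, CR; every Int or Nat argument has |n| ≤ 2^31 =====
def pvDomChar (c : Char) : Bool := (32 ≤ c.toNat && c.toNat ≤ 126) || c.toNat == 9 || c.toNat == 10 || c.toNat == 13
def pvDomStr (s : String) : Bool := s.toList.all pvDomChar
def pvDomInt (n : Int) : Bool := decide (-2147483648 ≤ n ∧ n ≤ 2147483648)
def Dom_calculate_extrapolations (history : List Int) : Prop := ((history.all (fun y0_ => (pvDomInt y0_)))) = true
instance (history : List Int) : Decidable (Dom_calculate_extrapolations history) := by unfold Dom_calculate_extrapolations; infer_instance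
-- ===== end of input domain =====

-- B replaces A's indexed loop over the growing series by a structural recursion on the
-- current row with zip-computed differences (objective: simpler); A = B on every input.

-- ===== PORT A =====
def pvAllZeros (nums : List Int) : Bool := nums.all (fun num => num == 0)

def pvCalcExtrapolation (history : List Int) : List Int :=
  (PySem.List.pyRange 1 (history.length : Int) 1).foldl
    (fun acc i => acc ++ [PySem.List.pyGetD history i 0 - PySem.List.pyGetD history (i - 1) 0]) []

def pvStep (st : List (List Int) × Bool) (i : Int) : List (List Int) × Bool :=
  if st.2 then st  -- 'returned' flag: once the Python function has returned, later indices change nothing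
  else
    let prev := PySem.List.pyGetD st.1 (i - 1) []  -- extrapolations_series[i-1]; always in range
    if pvAllZeros prev then (st.1, true)
    else (st.1 ++ [pvCalcExtrapolation prev], false)

def calculate_extrapolations (history : List Int) : List (List Int) :=
  ((PySem.List.pyRange 1 (history.length : Int) 1).foldl pvStep ([history], false)).1

-- ===== PORT B =====
def pvDiffs (seq : List Int) : List Int :=
  (seq.zip (seq.drop 1)).map (fun p => p.2 - p.1)

def pvGo (seq : List Int) : List (List Int) :=
  if seq.length ≤ 1 ∨ seq.all (fun x => x == 0) then [seq]
  else seq :: pvGo (pvDiffs seq)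
termination_by seq.length
decreasing_by
  simp [pvDiffs, List.length_zip]
  omega

def calculate_extrapolations_alt (history : List Int) : List (List Int) := pvGo history

-- ===== PRECONDITION & SPEC =====
def Spec_calculate_extrapolations (history : List Int) (out : List (List Int)) : Prop := out = calculate_extrapolations_alt history
instance (history : List Int) (out : List (List Int)) : Decidable (Spec_calculate_extrapolations history out) := by unfold Spec_calculate_extrapolations; infer_instance

-- ===== CLAIM (what is proved, stated in full; the proofs are below) =====
def Claim_equal_calculate_extrapolations : Prop := ∀ (history : List Int), Dom_calculate_extrapolations history → Spec_calculate_extrapolations history (calculate_extrapolations history)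

-- ===== LEMMAS AND PROOFS =====

-- A's index-computed difference row equals B's zip-computed one.
theorem pvCalc_eq_diffs (seq : List Int) : pvCalcExtrapolation seq = pvDiffs seq := by
  unfold pvCalcExtrapolation pvDiffs
  rw [PySem.List.foldl_append_singleton_eq_map]
  simp only [List.nil_append]
  apply List.ext_getElem
  · simp [PySem.List.length_pyRange_one, List.length_zip]
  · intro k h1 h2
    simp only [List.length_map, PySem.List.length_pyRange_one] at h1
    have hk : k + 1 < seq.length := by omega
    rw [List.getElem_map, List.getElem_map, PySem.List.getElem_pyRange_one]
    rw [show (1 : Int) + (k : Int) = ((k + 1 : Nat) : Int) by push_cast; ring]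
    rw [show ((k + 1 : Nat) : Int) - 1 = ((k : Nat) : Int) by push_cast; ring]
    rw [PySem.List.pyGetD_natCast, PySem.List.pyGetD_natCast]
    rw [List.getD_eq_getElem _ _ hk, List.getD_eq_getElem _ _ (by omega)]
    simp [List.getElem_zip]

-- once the returned-flag is set, the remaining fold keeps the state unchanged
theorem foldl_step_true (l : List Int) (acc : List (List Int)) :
    l.foldl pvStep (acc, true) = (acc, true) := by
  induction l with
  | nil => rfl
  | cons x xs ih => simpa [pvStep] using ih

-- loop invariant: with rows 0..i-1 accumulated (last = seq), the remaining iterations produce pre ++ pvGo seq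
theorem main_inv (m : Nat) (seq : List Int) (pre : List (List Int)) (hm : seq.length = m) :
    ((PySem.List.pyRange ((pre.length : Int) + 1) ((pre.length : Int) + m) 1).foldl
        pvStep (pre ++ [seq], false)).1 = pre ++ pvGo seq := by
  induction m generalizing seq pre with
  | zero =>
    rw [PySem.List.pyRange_one_eq_nil (by omega)]
    rw [pvGo]
    simp [hm]
  | succ m ih =>
    by_cases hm0 : m = 0
    · subst hm0
      rw [PySem.List.pyRange_one_eq_nil (by omega)]
      rw [pvGo]
      simp [hm]
    · rw [PySem.List.pyRange_one_cons (by omega), List.foldl_cons]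
      have hprev : pvStep (pre ++ [seq], false) ((pre.length : Int) + 1) =
          (if pvAllZeros seq then (pre ++ [seq], true)
           else ((pre ++ [seq]) ++ [pvCalcExtrapolation seq], false)) := by
        unfold pvStep
        simp only [if_neg Bool.false_ne_true]
        have : PySem.List.pyGetD (pre ++ [seq]) ((pre.length : Int) + 1 - 1) [] = seq := by
          rw [show ((pre.length : Int) + 1 - 1) = ((pre.length : Nat) : Int) by ring]
          rw [PySem.List.pyGetD_natCast]
          simp [List.getD]
        rw [this]
      rw [hprev]
      by_cases hz : pvAllZeros seq
      · rw [if_pos hz, foldl_step_true]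
        have hc : (seq.length ≤ 1 ∨ seq.all (fun x => x == 0)) := Or.inr hz
        conv_rhs => rw [pvGo]
        rw [if_pos hc]
      · rw [if_neg hz]
        have hd : (pvDiffs seq).length = m := by
          simp [pvDiffs, List.length_zip]
          omega
        have := ih (pvDiffs seq) (pre ++ [seq]) hd
        rw [show ((pre.length : Int) + 1 + 1) = (((pre ++ [seq]).length : Nat) : Int) + 1 by
              push_cast [List.length_append, List.length_singleton]; ring,
            show ((pre.length : Int) + (m + 1 : Nat)) = (((pre ++ [seq]).length : Nat) : Int) + m by
              push_cast [List.length_append, List.length_singleton]; ring]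
        rw [pvCalc_eq_diffs, this]
        have hc : ¬ (seq.length ≤ 1 ∨ seq.all (fun x => x == 0)) := by
          rw [not_or]
          refine ⟨by omega, by simpa [pvAllZeros] using hz⟩
        conv_rhs => rw [pvGo]
        rw [if_neg hc]
        simp

-- ===== VERDICT (by name: the statement is the Claim_ definition above) =====
theorem calculate_extrapolations_spec : Claim_equal_calculate_extrapolations := by
  intro history _
  unfold Spec_calculate_extrapolations calculate_extrapolations calculate_extrapolations_alt
  have h := main_inv history.length history [] rfl
  simpa using h
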